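-- pv_equiv track=rewrite | github.com/Yale-Jeon/JeonYale | programmers_school_coding_test/CodingTestHighScoreKit/DFS BFS/여행경로.py | dp
-- ===== SOURCE A (Python) =====
-- import copy
--
-- def dp(d, airport,course,i,n):
--     course.append(airport)
--     if i==n+1:
--         return [course]
--     ret = []
--     if airport not in d:
--         return ret
--     for x in d[airport]:
--         dd = copy.deepcopy(d)
--         dd[airport].remove(x)
--         ret += dp(dd,x,course[::],i+1,n)
--     return ret
-- ===== SOURCE B (Python) =====
-- def dp(d, airport, course, i, n):
--     k = n + 1 - i
--     if k < 0:
--         return []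
--     return [course + t for t in tails(d, airport, k)]
--
--
-- def tails(rem, apt, k):
--     # all ticket sequences of length k starting at apt, as suffix paths
--     if k == 0:
--         return [[apt]]
--     return [[apt] + t
--             for x in rem.get(apt, [])
--             for t in tails(removed(rem, apt, x), x, k - 1)]
--
--
-- def removed(rem, apt, x):
--     # rem with the first occurrence of x dropped from rem[apt] (shallow copy)
--     lst = list(rem[apt])
--     lst.remove(x)
--     return {**rem, apt: lst}
-- ===== Notes on version B (the rewrite author's own statement) =====
-- stated objective: faster
-- what changed: A does a depth-counting DFS that deep-copies the whole dict for every edge it tries and threads/copies the growing path through every call; B enumerates suffix itineraries by a count-down recursion (k tickets left), prepending the current airport, with only a shallow one-key dict update per edge and the course prefix attached once at the end.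
import Mathlib
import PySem

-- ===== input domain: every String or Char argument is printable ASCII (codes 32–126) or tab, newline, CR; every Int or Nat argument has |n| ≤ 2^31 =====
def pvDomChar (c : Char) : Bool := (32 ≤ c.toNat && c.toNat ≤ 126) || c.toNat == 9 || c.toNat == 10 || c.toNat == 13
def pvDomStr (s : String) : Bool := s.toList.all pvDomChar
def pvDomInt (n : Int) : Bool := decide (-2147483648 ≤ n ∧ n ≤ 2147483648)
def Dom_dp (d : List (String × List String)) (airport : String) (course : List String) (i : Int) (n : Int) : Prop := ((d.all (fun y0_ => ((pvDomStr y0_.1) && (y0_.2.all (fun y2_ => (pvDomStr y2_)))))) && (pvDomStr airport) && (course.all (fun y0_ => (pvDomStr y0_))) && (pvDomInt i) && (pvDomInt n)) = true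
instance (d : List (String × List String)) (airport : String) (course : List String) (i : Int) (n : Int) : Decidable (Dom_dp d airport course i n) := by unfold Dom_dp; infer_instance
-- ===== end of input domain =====

-- B replaces A's deepcopy-per-edge DFS by a count-down suffix enumeration with shallow per-edge updates;
-- A mutates its 'course' argument in place (append) while B does not — the equivalence proved here is about the return value only.

-- ===== PORT A =====
-- lst.remove(x): Python raises ValueError when x ∉ lst; at every call site below x ∈ lst, so the getD fallback is never taken
def pvRemoveF (x : String) (l : List String) : List String := (PySem.List.remove? l x).getD l

-- total number of tickets visible through first-match lookup (termination measure for dpA)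
def pvTickets (dm : PySem.Dict String (List String)) : Nat :=
  ((PySem.List.dedup dm.keys).map (fun k => (dm.getD k []).length)).sum

lemma pvSum_lt {l : List String} {f g : String → Nat} {a : String} (hnd : l.Nodup) (ha : a ∈ l)
    (hlt : g a < f a) (hag : ∀ k ∈ l, k ≠ a → g k = f k) :
    (l.map g).sum < (l.map f).sum := by
  induction l with
  | nil => cases ha
  | cons b l ih =>
    have hnd' := List.nodup_cons.mp hnd
    rcases List.mem_cons.mp ha with rfl | hmem
    · have hmap : l.map g = l.map f :=
        List.map_congr_left (fun k hk => hag k (List.mem_cons_of_mem _ hk)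
          (by intro h; exact hnd'.1 (h ▸ hk)))
      simp only [List.map_cons, List.sum_cons, hmap]
      omega
    · have hba : b ≠ a := by intro h; exact hnd'.1 (h ▸ hmem)
      have hb : g b = f b := hag b (List.mem_cons_self) hba
      have := ih hnd'.2 hmem (fun k hk => hag k (List.mem_cons_of_mem _ hk))
      simp only [List.map_cons, List.sum_cons, hb]
      omega

lemma pvMem_keys {dm : PySem.Dict String (List String)} {apt : String} {lst : List String}
    (h : dm.get? apt = some lst) : apt ∈ dm.keys := by
  unfold PySem.Dict.get? at h
  rcases Option.map_eq_some_iff.mp h with ⟨p, hp, -⟩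
  have hpr := List.find?_some hp
  have hmem : p ∈ dm.items := List.mem_of_find?_eq_some hp
  exact List.mem_map.mpr ⟨p, hmem, by simpa using hpr⟩

lemma pvGetD_eq {dm : PySem.Dict String (List String)} {apt : String} {lst : List String}
    (h : dm.get? apt = some lst) : dm.getD apt [] = lst := by
  simp [PySem.Dict.getD, h]

lemma pvKeys_insert_of_get? {dm : PySem.Dict String (List String)} {apt : String} {lst : List String}
    (h : dm.get? apt = some lst) (v : List String) : (dm.insert apt v).keys = dm.keys := by
  have hc : dm.contains apt = true := by
    by_contra hc
    have := (PySem.Dict.get?_eq_none_iff_contains dm apt).mpr (by simpa using hc)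
    rw [h] at this; cases this
  unfold PySem.Dict.insert
  simp only [hc, if_pos]
  unfold PySem.Dict.keys
  simp only [List.map_map]
  refine List.map_congr_left ?_
  intro p _
  by_cases hpk : (p.1 == apt) = true
  · simp [Function.comp, (beq_iff_eq.mp hpk).symm]
  · simp [Function.comp, hpk]

lemma pvTickets_lt {dm : PySem.Dict String (List String)} {apt x : String} {lst : List String}
    (h : dm.get? apt = some lst) (hx : x ∈ lst) :
    pvTickets (dm.modify apt [] (pvRemoveF x)) < pvTickets dm := by
  unfold pvTickets
  have hkeys : (dm.modify apt [] (pvRemoveF x)).keys = dm.keys := by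
    rw [PySem.Dict.keys_modify, pvKeys_insert_of_get? h]
  rw [hkeys]
  refine pvSum_lt (PySem.List.nodup_dedup _) ((PySem.List.mem_dedup _ _).mpr (pvMem_keys h)) ?_ ?_
  · rw [PySem.Dict.getD_modify_self, pvGetD_eq h]
    unfold pvRemoveF
    rw [PySem.List.remove?_eq_some_erase _ _ hx]
    have h1 : 1 ≤ lst.length := List.length_pos_of_mem hx
    simp [List.length_erase_of_mem hx]
    omega
  · intro k _ hk
    rw [PySem.Dict.getD_modify_of_ne]
    exact hk

def dpA (dm : PySem.Dict String (List String)) (airport : String) (course : List String)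
    (i : Int) (n : Int) : List (List String) :=
  let course := course ++ [airport]
  if i = n + 1 then [course]
  else
    match hA : dm.get? airport with
    | none => []         -- 'if airport not in d: return ret' (ret = [])
    | some lst =>
      lst.attach.foldl    -- attach: the termination argument needs x ∈ lst
        (fun ret x =>
          ret ++ dpA (dm.modify airport [] (pvRemoveF x.1)) x.1 course (i + 1) n)
        []
termination_by pvTickets dm
decreasing_by exact pvTickets_lt hA x.2

def dp (d : List (String × List String)) (airport : String) (course : List String) (i : Int) (n : Int) : List (List String) :=
  dpA (PySem.Dict.mk d) airport course i n

-- ===== PORT B =====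
-- 'lst = list(rem[apt]); lst.remove(x); return {**rem, apt: lst}' — at every call site apt is a key of rem
-- and x ∈ rem[apt], so the getD defaults / remove? fallback are never taken
def pvRemoved (rem : PySem.Dict String (List String)) (apt x : String) : PySem.Dict String (List String) :=
  rem.insert apt (pvRemoveF x (rem.getD apt []))

def tailsB (rem : PySem.Dict String (List String)) (apt : String) : Nat → List (List String)
  | 0 => [[apt]]
  | k + 1 =>
    (rem.getD apt []).flatMap
      (fun x => (tailsB (pvRemoved rem apt x) x k).map (fun t => apt :: t))

def dp_alt (d : List (String × List String)) (airport : String) (course : List String) (i : Int) (n : Int) : List (List String) :=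
  let k := n + 1 - i
  if k < 0 then []
  else (tailsB (PySem.Dict.mk d) airport k.toNat).map (fun t => course ++ t)

-- ===== PRECONDITION & SPEC =====
def Spec_dp (d : List (String × List String)) (airport : String) (course : List String) (i : Int) (n : Int) (out : List (List String)) : Prop := out = dp_alt d airport course i n
instance (d : List (String × List String)) (airport : String) (course : List String) (i : Int) (n : Int) (out : List (List String)) : Decidable (Spec_dp d airport course i n out) := by unfold Spec_dp; infer_instance

-- ===== CLAIM (what is proved, stated in full; the proofs are below) =====
def Claim_equal_dp : Prop := ∀ (d : List (String × List String)) (airport : String) (course : List String) (i : Int) (n : Int), Dom_dp d airport course i n → Spec_dp d airport course i n (dp d airport course i n)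

-- ===== LEMMAS AND PROOFS =====
lemma pvModify_eq_removed (dm : PySem.Dict String (List String)) (apt x : String) :
    dm.modify apt [] (pvRemoveF x) = pvRemoved dm apt x := rfl

lemma pvGetD_none {dm : PySem.Dict String (List String)} {apt : String}
    (h : dm.get? apt = none) : dm.getD apt [] = [] := by
  simp [PySem.Dict.getD, h]

lemma dpA_eq (t : Nat) : ∀ (dm : PySem.Dict String (List String)) (apt : String)
    (course : List String) (i n : Int), pvTickets dm ≤ t →
    dpA dm apt course i n =
      if n + 1 - i < 0 then []
      else (tailsB dm apt (n + 1 - i).toNat).map (fun tl => course ++ tl) := by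
  induction t using Nat.strong_induction_on with
  | _ t ih =>
    intro dm apt course i n ht
    by_cases hbase : i = n + 1
    · subst hbase
      rw [dpA]
      simp [tailsB]
    · rw [dpA]
      simp only [if_neg hbase]
      split
      next hA =>
        by_cases hneg : n + 1 - i < 0
        · simp [hneg]
        · have hk : (n + 1 - i).toNat = (n - i).toNat + 1 := by omega
          simp [hneg, hk, tailsB, pvGetD_none hA]
      next lst hA =>
        rw [PySem.List.foldl_append_eq_flatMap]
        rw [List.nil_append]
        have hrec : ∀ x : {y // y ∈ lst},
            dpA (dm.modify apt [] (pvRemoveF x.1)) x.1 (course ++ [apt]) (i + 1) n =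
              if n - i < 0 then []
              else (tailsB (pvRemoved dm apt x.1) x.1 (n - i).toNat).map
                (fun tl => (course ++ [apt]) ++ tl) := by
          intro x
          have hlt := pvTickets_lt hA x.2
          have h2 : n + 1 - (i + 1) = n - i := by ring
          have := ih (pvTickets (dm.modify apt [] (pvRemoveF x.1))) (lt_of_lt_of_le hlt ht)
            (dm.modify apt [] (pvRemoveF x.1)) x.1 (course ++ [apt]) (i + 1) n (le_refl _)
          rw [this, h2, pvModify_eq_removed]
        by_cases hneg : n + 1 - i < 0
        · have hneg' : n - i < 0 := by omega
          simp only [if_pos hneg]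
          refine List.flatMap_eq_nil_iff.mpr ?_
          intro x _
          rw [hrec x, if_pos hneg']
        · have hneg' : ¬ n - i < 0 := by omega
          have hk : (n + 1 - i).toNat = (n - i).toNat + 1 := by omega
          simp only [if_neg hneg, hk, tailsB, pvGetD_eq hA]
          rw [List.map_flatMap]
          conv_rhs => rw [← List.attach_map_subtype_val lst, List.flatMap_map]
          refine congrArg (List.flatMap · lst.attach) (funext fun x => ?_)
          rw [hrec x, if_neg hneg', List.map_map]
          refine List.map_congr_left (fun tl _ => ?_)
          simp

-- ===== VERDICT (by name: the statement is the Claim_ definition above) =====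
theorem dp_spec : Claim_equal_dp := by
  intro d airport course i n _
  have h := dpA_eq (pvTickets (PySem.Dict.mk d)) (PySem.Dict.mk d) airport course i n (le_refl _)
  simpa [Spec_dp, dp, dp_alt] using h
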